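-- pv_equiv track=rewrite | github.com/vinithbraj/openfabric | src/aor_runtime/runtime/response_stats.py | _backend_label
-- ===== SOURCE A (Python) =====
-- FORMATTER_TOOLS = {"text.format"}
--
-- def _backend_label(tools: list[str]) -> str:
--     """Handle the internal backend label helper path for this module.
--
--     Inputs:
--         Receives tools for this function; type hints and validators define accepted shapes.
--
--     Returns:
--         Returns the computed value described by the function name and type hints.
--
--     Used by:
--         Used by planning, execution, validation, and presentation code paths that import or call aor_runtime.runtime.response_stats._backend_label.
--     """
--     labels: list[str] = []
--     if any(tool.startswith("sql.") for tool in tools):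
--         labels.append("SQL database")
--     if any(tool.startswith("slurm.") for tool in tools):
--         labels.append("SLURM gateway")
--     if any(tool.startswith("fs.") for tool in tools):
--         labels.append("Filesystem")
--     if any(tool == "shell.exec" for tool in tools):
--         labels.append("Shell")
--     if any(tool.startswith("fetch.") for tool in tools):
--         labels.append("Fetch")
--     if any(tool in FORMATTER_TOOLS for tool in tools) and not labels:
--         labels.append("Local formatter")
--     if not labels:
--         labels.append("Runtime")
--     return ", ".join(_unique(labels))
--
-- def _unique(values: list[str]) -> list[str]:
--     """Handle the internal unique helper path for this module.
--
--     Inputs: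
--         Receives values for this function; type hints and validators define accepted shapes.
--
--     Returns:
--         Returns the computed value described by the function name and type hints.
--
--     Used by:
--         Used by planning, execution, validation, and presentation code paths that import or call aor_runtime.runtime.response_stats._unique.
--     """
--     seen: set[str] = set()
--     unique_values: list[str] = []
--     for value in values:
--         text = str(value or "").strip()
--         if not text or text in seen:
--             continue
--         seen.add(text)
--         unique_values.append(text)
--     return unique_values
-- ===== SOURCE B (Python) =====
-- FORMATTER_TOOLS = {"text.format"}
--
-- _PREFIX_LABELS = [
--     ("sql.", "SQL database"),
--     ("slurm.", "SLURM gateway"),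
--     ("fs.", "Filesystem"),
--     ("fetch.", "Fetch"),
-- ]
--
-- _PRIORITY = ["SQL database", "SLURM gateway", "Filesystem", "Shell", "Fetch"]
--
--
-- def _classify(tool: str):
--     """Map one tool name to its backend category label (or None)."""
--     if tool == "shell.exec":
--         return "Shell"
--     if tool in FORMATTER_TOOLS:
--         return "Local formatter"
--     for prefix, label in _PREFIX_LABELS:
--         if tool.startswith(prefix):
--             return label
--     return None
--
--
-- def _backend_label(tools: list[str]) -> str:
--     found = {_classify(t) for t in tools}
--     main = [label for label in _PRIORITY if label in found]
--     if main:
--         return ", ".join(main)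
--     if "Local formatter" in found:
--         return "Local formatter"
--     return "Runtime"
-- ===== Notes on version B (the rewrite author's own statement) =====
-- stated objective: alternative
-- what changed: Instead of A's six separate any() scans over tools plus a _unique dedup pass, B classifies each tool once into its category label via a data-driven prefix table, collects the labels into a set, and emits them by filtering a fixed priority list against that set, with the formatter/Runtime fallbacks as direct returns.
import Mathlib
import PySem

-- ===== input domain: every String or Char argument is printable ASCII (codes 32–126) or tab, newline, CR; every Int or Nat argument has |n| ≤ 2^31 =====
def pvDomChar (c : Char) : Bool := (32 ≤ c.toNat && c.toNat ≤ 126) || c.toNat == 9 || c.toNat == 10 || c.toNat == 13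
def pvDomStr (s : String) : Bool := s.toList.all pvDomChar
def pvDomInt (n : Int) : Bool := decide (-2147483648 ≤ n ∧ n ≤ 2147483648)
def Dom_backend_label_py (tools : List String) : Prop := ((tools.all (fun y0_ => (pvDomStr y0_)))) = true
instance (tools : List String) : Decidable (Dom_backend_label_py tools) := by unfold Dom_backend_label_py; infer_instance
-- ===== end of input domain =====

-- B replaces A's six per-category any() scans plus a _unique dedup pass by a per-tool
-- classification function feeding a set of labels, emitted in a fixed priority order
-- (objective: alternative).

-- ===== PORT A =====
def FORMATTER_TOOLS : PySem.Set String := PySem.Set.ofList ["text.format"]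

-- port of _unique
def unique_py (values : List String) : List String :=
  (values.foldl
    (fun (st : PySem.Set String × List String) value =>
      let text := PySem.Str.strip (if value == "" then "" else value)  -- str(value or "")
      if text == "" || PySem.Set.contains st.1 text then st
      else (PySem.Set.add st.1 text, st.2 ++ [text]))
    (PySem.Set.empty, [])).2

def backend_label_py (tools : List String) : String :=
  let labels : List String := []
  let labels := if tools.any (fun t => PySem.Str.startswith t "sql.") then labels ++ ["SQL database"] else labels
  let labels := if tools.any (fun t => PySem.Str.startswith t "slurm.") then labels ++ ["SLURM gateway"] else labels
  let labels := if tools.any (fun t => PySem.Str.startswith t "fs.") then labels ++ ["Filesystem"] else labels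
  let labels := if tools.any (fun t => t == "shell.exec") then labels ++ ["Shell"] else labels
  let labels := if tools.any (fun t => PySem.Str.startswith t "fetch.") then labels ++ ["Fetch"] else labels
  let labels := if tools.any (fun t => PySem.Set.contains FORMATTER_TOOLS t) && labels.isEmpty then labels ++ ["Local formatter"] else labels
  let labels := if labels.isEmpty then labels ++ ["Runtime"] else labels
  PySem.Str.join ", " (unique_py labels)

-- ===== PORT B =====
def PREFIX_LABELS : List (String × String) :=
  [("sql.", "SQL database"), ("slurm.", "SLURM gateway"), ("fs.", "Filesystem"), ("fetch.", "Fetch")]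

def PRIORITY : List String := ["SQL database", "SLURM gateway", "Filesystem", "Shell", "Fetch"]

-- the 'for prefix, label in _PREFIX_LABELS: if tool.startswith(prefix): return label' loop
def firstLabel : List (String × String) → String → Option String
  | [], _ => none
  | (p, l) :: rest, tool => if PySem.Str.startswith tool p then some l else firstLabel rest tool

def classify (tool : String) : Option String :=
  if tool == "shell.exec" then some "Shell"
  else if PySem.Set.contains FORMATTER_TOOLS tool then some "Local formatter"
  else firstLabel PREFIX_LABELS tool

def backend_label_py_alt (tools : List String) : String :=
  let found : PySem.Set (Option String) := PySem.Set.ofList (tools.map classify)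
  let main := PRIORITY.filter (fun label => PySem.Set.contains found (some label))
  if !main.isEmpty then PySem.Str.join ", " main
  else if PySem.Set.contains found (some "Local formatter") then "Local formatter"
  else "Runtime"

-- ===== PRECONDITION & SPEC =====
def Spec_backend_label_py (tools : List String) (out : String) : Prop := out = backend_label_py_alt tools
instance (tools : List String) (out : String) : Decidable (Spec_backend_label_py tools out) := by unfold Spec_backend_label_py; infer_instance

-- ===== CLAIM =====
def Claim_equal_backend_label_py : Prop := ∀ (tools : List String), Dom_backend_label_py tools → Spec_backend_label_py tools (backend_label_py tools)

-- ===== LEMMAS AND PROOFS =====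

-- membership in the set built from the classification map is an any() over the tools
theorem contains_ofList_map (f : String → Option String) (xs : List String) (y : Option String) :
    PySem.Set.contains (PySem.Set.ofList (xs.map f)) y = xs.any (fun x => f x == y) := by
  rw [Bool.eq_iff_iff, PySem.Set.contains_iff, PySem.Set.mem_ofList, List.any_eq_true]
  simp only [List.mem_map, beq_iff_eq]

-- two incomparable prefixes cannot both start the same string
theorem startswith_excl {t p q : String}
    (h1 : PySem.Str.startswith t p = true)
    (hpq : ¬ p.toList <+: q.toList) (hqp : ¬ q.toList <+: p.toList) :
    PySem.Str.startswith t q = false := by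
  by_contra h
  rw [Bool.not_eq_false] at h
  rw [PySem.Str.startswith_eq, PySem.Chars.startswith_iff] at h h1
  rcases List.prefix_or_prefix_of_prefix h1 h with hp | hp
  · exact hpq hp
  · exact hqp hp

theorem classify_plain {t : String} (h0 : t ≠ "shell.exec") (h1 : t ≠ "text.format") :
    classify t = firstLabel PREFIX_LABELS t := by
  simp [classify, h0, h1, FORMATTER_TOOLS, PySem.Set.mem_ofList]

theorem classify_sql (t : String) :
    (classify t == some "SQL database") = PySem.Str.startswith t "sql." := by
  by_cases h0 : t = "shell.exec"; · subst h0; decide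
  by_cases h1 : t = "text.format"; · subst h1; decide
  rw [classify_plain h0 h1]
  simp only [PREFIX_LABELS, firstLabel, PySem.Str.startswith_eq]
  by_cases hs : PySem.Chars.startswith t.toList ['s','q','l','.'] = true
  · simp [hs]
  · split_ifs <;> simp_all

theorem classify_slurm (t : String) :
    (classify t == some "SLURM gateway") = PySem.Str.startswith t "slurm." := by
  by_cases h0 : t = "shell.exec"; · subst h0; decide
  by_cases h1 : t = "text.format"; · subst h1; decide
  rw [classify_plain h0 h1]
  simp only [PREFIX_LABELS, firstLabel, PySem.Str.startswith_eq]
  by_cases hs : PySem.Chars.startswith t.toList ['s','l','u','r','m','.'] = true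
  · have ha := startswith_excl (p := "slurm.") (q := "sql.") (by simpa using hs) (by decide) (by decide)
    simp at ha
    simp [hs, ha]
  · split_ifs <;> simp_all

theorem classify_fs (t : String) :
    (classify t == some "Filesystem") = PySem.Str.startswith t "fs." := by
  by_cases h0 : t = "shell.exec"; · subst h0; decide
  by_cases h1 : t = "text.format"; · subst h1; decide
  rw [classify_plain h0 h1]
  simp only [PREFIX_LABELS, firstLabel, PySem.Str.startswith_eq]
  by_cases hs : PySem.Chars.startswith t.toList ['f','s','.'] = true
  · have ha := startswith_excl (p := "fs.") (q := "sql.") (by simpa using hs) (by decide) (by decide)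
    have hb := startswith_excl (p := "fs.") (q := "slurm.") (by simpa using hs) (by decide) (by decide)
    simp at ha hb
    simp [hs, ha, hb]
  · split_ifs <;> simp_all

theorem classify_fetch (t : String) :
    (classify t == some "Fetch") = PySem.Str.startswith t "fetch." := by
  by_cases h0 : t = "shell.exec"; · subst h0; decide
  by_cases h1 : t = "text.format"; · subst h1; decide
  rw [classify_plain h0 h1]
  simp only [PREFIX_LABELS, firstLabel, PySem.Str.startswith_eq]
  by_cases hs : PySem.Chars.startswith t.toList ['f','e','t','c','h','.'] = true
  · have ha := startswith_excl (p := "fetch.") (q := "sql.") (by simpa using hs) (by decide) (by decide)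
    have hb := startswith_excl (p := "fetch.") (q := "slurm.") (by simpa using hs) (by decide) (by decide)
    have hc := startswith_excl (p := "fetch.") (q := "fs.") (by simpa using hs) (by decide) (by decide)
    simp at ha hb hc
    simp [hs, ha, hb, hc]
  · split_ifs <;> simp_all

theorem classify_shell (t : String) :
    (classify t == some "Shell") = (t == "shell.exec") := by
  by_cases h0 : t = "shell.exec"; · subst h0; decide
  by_cases h1 : t = "text.format"; · subst h1; decide
  rw [classify_plain h0 h1]
  simp only [PREFIX_LABELS, firstLabel, PySem.Str.startswith_eq]
  split_ifs <;> simp_all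

theorem classify_fmt (t : String) :
    (classify t == some "Local formatter") = PySem.Set.contains FORMATTER_TOOLS t := by
  by_cases h0 : t = "shell.exec"; · subst h0; decide
  by_cases h1 : t = "text.format"; · subst h1; decide
  have hc : PySem.Set.contains FORMATTER_TOOLS t = false := by
    rw [← Bool.not_eq_true, PySem.Set.contains_iff]
    simpa [FORMATTER_TOOLS, PySem.Set.mem_ofList] using h1
  rw [classify_plain h0 h1, hc]
  simp only [PREFIX_LABELS, firstLabel, PySem.Str.startswith_eq]
  split_ifs <;> simp_all

-- ===== VERDICT =====
theorem backend_label_py_spec : Claim_equal_backend_label_py := by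
  intro tools _
  show backend_label_py tools = backend_label_py_alt tools
  unfold backend_label_py backend_label_py_alt
  simp only [PRIORITY, List.filter_cons, List.filter_nil, contains_ofList_map,
    classify_sql, classify_slurm, classify_fs, classify_shell, classify_fetch, classify_fmt]
  generalize tools.any (fun t => PySem.Str.startswith t "sql.") = b1
  generalize tools.any (fun t => PySem.Str.startswith t "slurm.") = b2
  generalize tools.any (fun t => PySem.Str.startswith t "fs.") = b3
  generalize tools.any (fun t => t == "shell.exec") = b4
  generalize tools.any (fun t => PySem.Str.startswith t "fetch.") = b5
  generalize tools.any (fun t => PySem.Set.contains FORMATTER_TOOLS t) = b6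
  revert b1 b2 b3 b4 b5 b6
  decide
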